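-- pv_equiv track=rewrite | github.com/michaelcmartin/bumbershoot | genesis/tools/makenyan.py | textdump_z88dk
-- ===== SOURCE A (Python) =====
-- def textdump_z88dk(result, loop_point):
--     i = 0
--     val = ""
--     for byt in result:
--         if i % 16 == 0 or i == loop_point:
--             if i == 0:
--                 val += 'song:   '
--             elif i == loop_point:
--                 val += '\nsegno:  '
--                 i = 0
--                 loop_point = -1
--             else:
--                 val += '\n        '
--             val += 'defb    '
--         else:
--             val += ','
--         val += '$%02x' % byt
--         i += 1
--     return val
-- ===== SOURCE B (Python) =====
-- def _seg_lines(label, seg):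
--     lines = []
--     start = 0
--     while start < len(seg):
--         lines.append(label + 'defb    ' + ','.join('$%02x' % b for b in seg[start:start+16]))
--         label = '        '
--         start += 16
--     return lines
--
-- def textdump_z88dk(result, loop_point):
--     if 1 <= loop_point < len(result):
--         lines = _seg_lines('song:   ', result[:loop_point]) + \
--                 _seg_lines('segno:  ', result[loop_point:])
--     else:
--         lines = _seg_lines('song:   ', result)
--     return '\n'.join(lines)
-- ===== Notes on version B (the rewrite author's own statement) =====
-- stated objective: simpler
-- what changed: Replaces the stateful per-byte loop (counter with mid-stream reset and loop_point sentinel mutation) by a two-phase construction: split the array at loop_point when 1 <= loop_point < len, render each segment in 16-byte chunks as whole lines, and '\n'.join the lines.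
import Mathlib
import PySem

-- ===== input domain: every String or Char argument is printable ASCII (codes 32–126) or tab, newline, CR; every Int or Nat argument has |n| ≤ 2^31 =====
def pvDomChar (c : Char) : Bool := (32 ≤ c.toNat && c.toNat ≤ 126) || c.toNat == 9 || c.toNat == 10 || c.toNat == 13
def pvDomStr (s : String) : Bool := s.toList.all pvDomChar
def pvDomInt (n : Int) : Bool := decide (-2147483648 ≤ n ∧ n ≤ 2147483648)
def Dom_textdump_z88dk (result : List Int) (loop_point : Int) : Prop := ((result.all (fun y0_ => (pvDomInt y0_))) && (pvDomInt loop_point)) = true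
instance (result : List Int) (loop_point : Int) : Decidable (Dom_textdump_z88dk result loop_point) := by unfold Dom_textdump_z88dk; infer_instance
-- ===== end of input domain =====

-- B replaces A's stateful per-byte loop (counter with mid-stream reset and loop_point
-- sentinel mutation) by a split-at-loop_point, chunk-by-16, join-lines construction (objective: simpler).

-- ===== PORT A =====
-- shared helper (both Pythons use '$%02x' % byt): Python's '%02x' % n
def hex02 (n : Int) : String :=
  if n < 0 then "-" ++ String.ofList (Nat.toDigits 16 n.natAbs)
  else
    let s := String.ofList (Nat.toDigits 16 n.toNat)
    if s.length < 2 then "0" ++ s else s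

def stepA (st : Int × Int × String) (byt : Int) : Int × Int × String :=
  let i := st.1
  let lp := st.2.1
  let val := st.2.2
  if PySem.Int.mod i 16 == 0 || i == lp then
    if i == 0 then (i + 1, lp, val ++ "song:   " ++ "defb    " ++ ("$" ++ hex02 byt))
    else if i == lp then (0 + 1, (-1 : Int), val ++ "\nsegno:  " ++ "defb    " ++ ("$" ++ hex02 byt))
    else (i + 1, lp, val ++ "\n        " ++ "defb    " ++ ("$" ++ hex02 byt))
  else (i + 1, lp, val ++ "," ++ ("$" ++ hex02 byt))

def textdump_z88dk (result : List Int) (loop_point : Int) : String :=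
  (result.foldl stepA (0, loop_point, "")).2.2

-- ===== PORT B =====
-- _seg_lines(label, seg): while start < len(seg): one line per 16-byte chunk seg[start:start+16]
-- (the counter is a Nat; seg[start:start+16] with 0 <= start is exactly (seg.drop start).take 16)
def goB (label : String) (seg : List Int) (start : Nat) : List String :=
  if start < seg.length then
    (label ++ "defb    " ++ PySem.Str.join "," (((seg.drop start).take 16).map (fun b => "$" ++ hex02 b)))
      :: goB "        " seg (start + 16)
  else []
termination_by seg.length - start

-- result[:loop_point] / result[loop_point:] with 1 <= loop_point < len(result): take/drop of toNat is exact here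
def textdump_z88dk_alt (result : List Int) (loop_point : Int) : String :=
  let lines :=
    if 1 ≤ loop_point ∧ loop_point < (result.length : Int)
    then goB "song:   " (result.take loop_point.toNat) 0
         ++ goB "segno:  " (result.drop loop_point.toNat) 0
    else goB "song:   " result 0
  PySem.Str.join "\n" lines

-- ===== PRECONDITION & SPEC =====
def Spec_textdump_z88dk (result : List Int) (loop_point : Int) (out : String) : Prop := out = textdump_z88dk_alt result loop_point
instance (result : List Int) (loop_point : Int) (out : String) : Decidable (Spec_textdump_z88dk result loop_point out) := by unfold Spec_textdump_z88dk; infer_instance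

-- ===== CLAIM (what is proved, stated in full; the proofs are below) =====
def Claim_equal_textdump_z88dk : Prop := ∀ (result : List Int) (loop_point : Int), Dom_textdump_z88dk result loop_point → Spec_textdump_z88dk result loop_point (textdump_z88dk result loop_point)

-- ===== LEMMAS AND PROOFS =====

-- goB re-expressed as a structural recursion on the (dropped) segment
def segLinesB (label : String) (seg : List Int) : List String :=
  if h : seg = [] then []
  else (label ++ "defb    " ++ PySem.Str.join "," ((seg.take 16).map (fun b => "$" ++ hex02 b)))
       :: segLinesB "        " (seg.drop 16)
termination_by seg.length
decreasing_by
  have hp : 0 < seg.length := List.length_pos_iff.mpr h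
  simp [List.length_drop]; omega

theorem goB_eq (seg : List Int) : ∀ (k start : Nat), seg.length - start ≤ k →
    ∀ label, goB label seg start = segLinesB label (seg.drop start) := by
  intro k
  induction k with
  | zero =>
    intro start hk label
    rw [goB, if_neg (by omega), List.drop_eq_nil_iff.mpr (by omega), segLinesB]
    simp
  | succ k ih =>
    intro start hk label
    by_cases hs : start < seg.length
    · rw [goB, if_pos hs,
        segLinesB, dif_neg (by simp [List.drop_eq_nil_iff]; omega),
        ih (start + 16) (by omega), List.drop_drop]
    · rw [goB, if_neg hs, List.drop_eq_nil_iff.mpr (by omega), segLinesB]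
      simp

theorem goB_zero (label : String) (seg : List Int) : goB label seg 0 = segLinesB label seg := by
  rw [goB_eq seg seg.length 0 (by omega), List.drop_zero]

theorem mod16 (i : Int) : PySem.Int.mod i 16 = i % 16 :=
  PySem.Int.mod_eq_emod_of_pos (by norm_num)

-- the text A's loop appends, as a recursion on the byte list
def runA : List Int → Int → Int → String
  | [], _, _ => ""
  | b :: bs, i, lp =>
    if PySem.Int.mod i 16 == 0 || i == lp then
      if i == 0 then "song:   " ++ "defb    " ++ ("$" ++ hex02 b) ++ runA bs (i + 1) lp
      else if i == lp then "\nsegno:  " ++ "defb    " ++ ("$" ++ hex02 b) ++ runA bs (0 + 1) (-1)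
      else "\n        " ++ "defb    " ++ ("$" ++ hex02 b) ++ runA bs (i + 1) lp
    else "," ++ ("$" ++ hex02 b) ++ runA bs (i + 1) lp

theorem foldA (xs : List Int) : ∀ (i lp : Int) (v : String),
    (xs.foldl stepA (i, lp, v)).2.2 = v ++ runA xs i lp := by
  induction xs with
  | nil => intro i lp v; simp [runA]
  | cons b bs ih =>
    intro i lp v
    simp only [List.foldl_cons, stepA, runA]
    split_ifs <;> simp [ih, String.append_assoc]

-- per-byte emission with the counter reduced mod 16, loop_point disabled
def fR : List Int → Nat → String
  | [], _ => ""
  | b :: bs, j =>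
    (if j = 0 then "\n" ++ "        " ++ "defb    " else ",") ++ ("$" ++ hex02 b) ++ fR bs ((j + 1) % 16)

def tailJoin (sep : String) : List String → String
  | [] => ""
  | x :: xs => sep ++ x ++ tailJoin sep xs

def restR (ws : List Int) : String := tailJoin "\n" (segLinesB "        " ws)

theorem join_cons (sep x : String) (l : List String) :
    PySem.Str.join sep (x :: l) = x ++ tailJoin sep l := by
  induction l generalizing x with
  | nil => simp [PySem.Str.join, PySem.Chars.join, List.intercalate, tailJoin]
  | cons y ys ih =>
    have h2 : PySem.Str.join sep (x :: y :: ys) = x ++ sep ++ PySem.Str.join sep (y :: ys) := by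
      simp [PySem.Str.join, PySem.Chars.join, List.intercalate,
        String.ofList_append, String.append_assoc]
    rw [h2, ih, tailJoin]
    simp [String.append_assoc]

theorem tailJoin_append (sep : String) (l1 l2 : List String) :
    tailJoin sep (l1 ++ l2) = tailJoin sep l1 ++ tailJoin sep l2 := by
  induction l1 with
  | nil => simp [tailJoin]
  | cons x xs ih => simp [tailJoin, ih, String.append_assoc]

theorem chunkG (zs : List Int) : ∀ (j : Nat), j < 16 →
    fR zs j = if j = 0 then restR zs
      else tailJoin "," ((zs.take (16 - j)).map (fun b => "$" ++ hex02 b)) ++ restR (zs.drop (16 - j)) := by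
  induction zs with
  | nil =>
    intro j hj
    rw [fR, restR, segLinesB]
    simp [tailJoin, restR, segLinesB]
  | cons b bs ih =>
    intro j hj
    by_cases h0 : j = 0
    · subst h0
      rw [fR, restR, segLinesB]
      have h1 := ih 1 (by norm_num)
      simp only [if_neg (by norm_num : ¬ (1:Nat) = 0)] at h1
      simp only [reduceDIte]
      rw [show (16:Nat) = 15+1 from rfl, List.take_succ_cons, List.drop_succ_cons,
        List.map_cons, join_cons]
      simp [h1, restR, tailJoin, ← String.append_assoc]
    · rw [fR, if_neg h0, if_neg h0]
      by_cases h15 : j = 15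
      · subst h15
        have h1 := ih 0 (by norm_num)
        simp only [if_pos rfl] at h1
        norm_num
        simp [h1, tailJoin, ← String.append_assoc,
          show (16:Nat) - 15 = 1 from rfl, List.take_succ_cons, List.drop_succ_cons]
      · have hj1 : (j + 1) % 16 = j + 1 := Nat.mod_eq_of_lt (by omega)
        have h1 := ih (j+1) (by omega)
        rw [if_neg (by omega : ¬ j + 1 = 0)] at h1
        rw [hj1, h1]
        have htake : (16 - j) = (15 - j) + 1 := by omega
        rw [htake, List.take_succ_cons, List.drop_succ_cons, List.map_cons, tailJoin]
        have : 16 - (j+1) = 15 - j := by omega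
        rw [this]
        simp [← String.append_assoc]

theorem runA_nohit (xs : List Int) : ∀ (i lp : Int), 1 ≤ i → (lp < i ∨ i + xs.length ≤ lp) →
    runA xs i lp = fR xs ((i % 16).toNat) := by
  induction xs with
  | nil => intro i lp _ _; simp [runA, fR]
  | cons b bs ih =>
    intro i lp h1 h2
    have hlen : 0 ≤ (bs.length : Int) := by positivity
    have hlp : i ≠ lp := by simp [List.length_cons] at h2; omega
    have hi0 : i ≠ 0 := by omega
    have hrec := ih (i+1) lp (by omega) (by simp [List.length_cons] at h2 ⊢; omega)
    rw [runA, mod16, fR, hrec]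
    by_cases hm : i % 16 = 0
    · rw [if_pos (by simp [hm]), if_neg (by simp [hi0]), if_neg (by simp [hlp]),
        if_pos (by omega : (i % 16).toNat = 0),
        show ((i+1) % 16).toNat = ((i % 16).toNat + 1) % 16 by omega]
      simp [← String.append_assoc]
    · rw [if_neg (by simp [hm, hlp]), if_neg (by omega : ¬ (i % 16).toNat = 0),
        show ((i+1) % 16).toNat = ((i % 16).toNat + 1) % 16 by omega]

-- the text A appends from the segno hit onwards
def sS : List Int → String
  | [] => ""
  | z :: zs' => "\n" ++ "segno:  " ++ "defb    " ++ ("$" ++ hex02 z) ++ fR zs' 1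

theorem runA_hit (ys : List Int) : ∀ (zs : List Int) (i lp : Int), 1 ≤ i → lp = i + ys.length → zs ≠ [] →
    runA (ys ++ zs) i lp = fR ys ((i % 16).toNat) ++ sS zs := by
  induction ys with
  | nil =>
    intro zs i lp h1 hlp hne
    cases zs with
    | nil => exact absurd rfl hne
    | cons z zs' =>
      simp only [List.length_nil, Int.natCast_zero, add_zero] at hlp
      subst hlp
      rw [List.nil_append, runA, if_pos (by simp), if_neg (by simp; omega), if_pos (by simp),
        show (0:Int) + 1 = 1 from rfl, runA_nohit zs' 1 (-1) (by norm_num) (by left; norm_num)]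
      simp [fR, sS, ← String.append_assoc]
  | cons y ys' ih =>
    intro zs i lp h1 hlp hne
    have hlen : 0 ≤ (ys'.length : Int) := by positivity
    simp only [List.length_cons] at hlp
    have hlpi : i ≠ lp := by omega
    have hi0 : i ≠ 0 := by omega
    have hrec := ih zs (i+1) lp (by omega) (by push_cast at hlp ⊢; omega) hne
    rw [List.cons_append, runA, mod16, fR, hrec]
    by_cases hm : i % 16 = 0
    · rw [if_pos (by simp [hm]), if_neg (by simp [hi0]), if_neg (by simp [hlpi]),
        if_pos (by omega : (i % 16).toNat = 0),
        show ((i+1) % 16).toNat = ((i % 16).toNat + 1) % 16 by omega]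
      simp [← String.append_assoc]
    · rw [if_neg (by simp [hm, hlpi]), if_neg (by omega : ¬ (i % 16).toNat = 0),
        show ((i+1) % 16).toNat = ((i % 16).toNat + 1) % 16 by omega]
      simp [← String.append_assoc]

-- one unfolding of segLinesB on a nonempty segment
theorem segLinesB_cons (label : String) (s : Int) (r : List Int) :
    segLinesB label (s :: r) =
      (label ++ "defb    " ++ (("$" ++ hex02 s) ++ tailJoin "," ((r.take 15).map (fun b => "$" ++ hex02 b))))
        :: segLinesB "        " (r.drop 15) := by
  rw [segLinesB, dif_neg (by simp : ¬ s :: r = [])]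
  rw [show (16:Nat) = 15+1 from rfl, List.take_succ_cons, List.drop_succ_cons,
    List.map_cons, join_cons]

-- ===== VERDICT (by name: the statement is the Claim_ definition above) =====
theorem textdump_z88dk_spec : Claim_equal_textdump_z88dk := by
  unfold Claim_equal_textdump_z88dk
  intro result lp _
  unfold Spec_textdump_z88dk textdump_z88dk textdump_z88dk_alt
  simp only [goB_zero]
  cases result with
  | nil =>
    rw [if_neg (by simp; omega)]
    simp [segLinesB, PySem.Str.join, PySem.Chars.join, List.intercalate]
  | cons b rest =>
    rw [foldA, runA, if_pos (by simp [mod16]), if_pos (by simp),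
      show (0:Int) + 1 = 1 from rfl]
    by_cases hc : 1 ≤ lp ∧ lp < (((b :: rest).length : Nat) : Int)
    · obtain ⟨h1, h2⟩ := hc
      have hk : lp.toNat - 1 < rest.length := by simp [List.length_cons] at h2; omega
      obtain ⟨z, zs', hz⟩ : ∃ z zs', rest.drop (lp.toNat - 1) = z :: zs' := by
        cases hzz : rest.drop (lp.toNat - 1) with
        | nil => exact absurd hzz (by simp [List.drop_eq_nil_iff]; omega)
        | cons z zs' => exact ⟨z, zs', rfl⟩
      have hrun : runA rest 1 lp = fR (rest.take (lp.toNat - 1)) 1 ++ sS (rest.drop (lp.toNat - 1)) := by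
        conv_lhs => rw [← List.take_append_drop (lp.toNat - 1) rest]
        rw [runA_hit _ _ 1 lp (by norm_num)
          (by rw [List.length_take_of_le hk.le]; omega) (by rw [hz]; simp)]
        norm_num
      rw [hrun, if_pos ⟨h1, h2⟩]
      rw [show (b :: rest).take lp.toNat = b :: rest.take (lp.toNat - 1) by
            rw [show lp.toNat = (lp.toNat - 1) + 1 by omega, List.take_succ_cons]; simp,
          show (b :: rest).drop lp.toNat = z :: zs' by
            rw [show lp.toNat = (lp.toNat - 1) + 1 by omega, List.drop_succ_cons]; simp [hz]]
      rw [segLinesB_cons, segLinesB_cons, List.cons_append, join_cons]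
      rw [chunkG (rest.take (lp.toNat - 1)) 1 (by norm_num), if_neg (by norm_num)]
      rw [hz, sS, chunkG zs' 1 (by norm_num), if_neg (by norm_num)]
      simp [tailJoin, tailJoin_append, restR, ← String.append_assoc]
    · rw [if_neg hc,
        runA_nohit rest 1 lp (by norm_num)
          (by simp [List.length_cons] at hc ⊢; omega)]
      rw [show (((1:Int)) % 16).toNat = 1 from rfl, segLinesB_cons, join_cons]
      rw [chunkG rest 1 (by norm_num), if_neg (by norm_num)]
      simp [tailJoin, restR, ← String.append_assoc]
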